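-- pv_equiv track=rewrite | github.com/juanbelieni/fgv | python-basico/src/atividades/lista-04/lista_04_juan_belieni.py | favoritos
-- ===== SOURCE A (Python) =====
-- def favoritos(lista: list, set_a: set, set_b: set):
--     felicidade = 0
--     for i in lista:
--         if i in set_a:
--             felicidade += 1
--         if i in set_b:
--             felicidade += -1
--
--     return felicidade
-- ===== SOURCE B (Python) =====
-- def favoritos(lista: list, set_a: set, set_b: set):
--     # Build a frequency table of lista once, then sum multiplicities over the two sets.
--     c = {}
--     for i in lista:
--         c[i] = c.get(i, 0) + 1
--     return sum(c.get(x, 0) for x in set_a) - sum(c.get(x, 0) for x in set_b)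
-- ===== Notes on version B (the rewrite author's own statement) =====
-- stated objective: alternative
-- what changed: B builds a frequency table of lista in one pass and then sums the multiplicities over set_a and set_b (table-first, iterate over the sets), instead of A's loop over lista with two membership tests per element.
import Mathlib
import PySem

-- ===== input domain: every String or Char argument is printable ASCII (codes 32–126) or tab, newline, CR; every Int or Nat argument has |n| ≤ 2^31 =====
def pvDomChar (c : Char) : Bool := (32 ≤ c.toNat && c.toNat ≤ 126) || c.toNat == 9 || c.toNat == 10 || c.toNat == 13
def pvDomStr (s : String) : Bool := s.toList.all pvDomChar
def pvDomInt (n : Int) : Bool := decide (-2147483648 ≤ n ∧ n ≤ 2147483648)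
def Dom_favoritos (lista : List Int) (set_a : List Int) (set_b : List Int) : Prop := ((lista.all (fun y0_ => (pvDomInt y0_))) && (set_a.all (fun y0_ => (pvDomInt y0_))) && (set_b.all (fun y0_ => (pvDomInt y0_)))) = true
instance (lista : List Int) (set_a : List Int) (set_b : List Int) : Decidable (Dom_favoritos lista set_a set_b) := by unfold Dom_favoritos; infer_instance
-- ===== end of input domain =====

-- B builds a frequency table of lista once and sums multiplicities over the two sets, instead of A's per-element membership tests; objective: alternative decomposition.


-- ===== PORT A =====
def favoritos (lista : List Int) (set_a : List Int) (set_b : List Int) : Int :=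
  lista.foldl (fun felicidade i =>
    let felicidade := if set_a.contains i then felicidade + 1 else felicidade
    if set_b.contains i then felicidade + (-1) else felicidade) 0

-- ===== PORT B =====
def favoritos_alt (lista : List Int) (set_a : List Int) (set_b : List Int) : Int :=
  let c := lista.foldl (fun d i => d.insert i (d.getD i 0 + 1)) (PySem.Dict.empty : PySem.Dict Int Int)
  (set_a.map (fun x => c.getD x 0)).sum - (set_b.map (fun x => c.getD x 0)).sum

-- ===== PRECONDITION & SPEC =====
-- Pre_ states the set-representation invariant: set_a and set_b are Python sets, so the
-- lists encoding them hold distinct elements (the type convention for Python sets).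
def Pre_favoritos (lista : List Int) (set_a : List Int) (set_b : List Int) : Prop :=
  set_a.Nodup ∧ set_b.Nodup
instance (lista : List Int) (set_a : List Int) (set_b : List Int) : Decidable (Pre_favoritos lista set_a set_b) := by unfold Pre_favoritos; infer_instance
def pvWitness_favoritos : List Int × List Int × List Int := ([1, 2, 1, 3], [1, 3], [2, 5])

def Spec_favoritos (lista : List Int) (set_a : List Int) (set_b : List Int) (out : Int) : Prop := out = favoritos_alt lista set_a set_b
instance (lista : List Int) (set_a : List Int) (set_b : List Int) (out : Int) : Decidable (Spec_favoritos lista set_a set_b out) := by unfold Spec_favoritos; infer_instance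

-- ===== CLAIM (what is proved, stated in full; the proofs are below) =====
def Claim_equal_favoritos : Prop := ∀ (lista : List Int) (set_a : List Int) (set_b : List Int), Dom_favoritos lista set_a set_b → Pre_favoritos lista set_a set_b → Spec_favoritos lista set_a set_b (favoritos lista set_a set_b)

-- ===== LEMMAS AND PROOFS =====

-- summing counts over a duplicate-free list: prepending i to l raises the sum by 1 iff i ∈ s
theorem sum_count_cons (s : List Int) (i : Int) (l : List Int) (hs : s.Nodup) :
    (s.map (fun x => ((i :: l).count x : Int))).sum
      = (s.map (fun x => ((l.count x : Int)))).sum + (if s.contains i then 1 else 0) := by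
  induction s with
  | nil => simp
  | cons y rest ih =>
    rcases List.nodup_cons.mp hs with ⟨hy, hrest⟩
    have ih' := ih hrest
    simp only [List.map_cons, List.sum_cons, List.contains_cons, Bool.or_eq_true, beq_iff_eq,
      List.contains_eq_mem, decide_eq_true_eq] at *
    rw [ih']
    by_cases hyi : y = i
    · subst hyi
      simp [List.count_cons, hy]
      push_cast; ring
    · have h2 : ¬ (i = y) := fun h => hyi h.symm
      have hcount : (i :: l).count y = l.count y := by
        simp [List.count_cons, h2]
      rw [hcount]
      simp only [List.mem_cons, h2, false_or]
      split_ifs <;> push_cast <;> ring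

-- A's loop, with a general accumulator, equals acc + Σ_a count − Σ_b count
theorem favoritos_loop (set_a set_b : List Int) (ha : set_a.Nodup) (hb : set_b.Nodup) :
    ∀ (lista : List Int) (acc : Int),
      lista.foldl (fun felicidade i =>
        let felicidade := if set_a.contains i then felicidade + 1 else felicidade
        if set_b.contains i then felicidade + (-1) else felicidade) acc
      = acc + (set_a.map (fun x => ((lista.count x : Int)))).sum
            - (set_b.map (fun x => ((lista.count x : Int)))).sum := by
  intro lista
  induction lista with
  | nil => intro acc; simp
  | cons i l ih =>
    intro acc
    simp only [List.foldl_cons]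
    rw [ih, sum_count_cons set_a i l ha, sum_count_cons set_b i l hb]
    simp only [List.contains_eq_mem, decide_eq_true_eq]
    split_ifs <;> ring

-- the frequency table reads back the count
theorem getD_table (lista : List Int) (x : Int) :
    (lista.foldl (fun d i => d.insert i (d.getD i 0 + 1)) (PySem.Dict.empty : PySem.Dict Int Int)).getD x 0
      = (lista.count x : Int) := by
  rw [PySem.Dict.getD_foldl_insert_add_one]
  simp

-- ===== VERDICT (by name: the statement is the Claim_ definition above) =====
theorem favoritos_spec : Claim_equal_favoritos := by
  intro lista set_a set_b _hdom hpre
  unfold Spec_favoritos favoritos favoritos_alt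
  rw [favoritos_loop set_a set_b hpre.1 hpre.2 lista 0]
  simp only [getD_table]
  ring
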